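-- pv_equiv track=rewrite | github.com/ryanbhayward/games-puzzles-algorithms | simple/chomp/chomp.py | myhash
-- ===== SOURCE A (Python) =====
-- def myhash(L,n):          # n is max row length
--   assert(len(L)<=n)
--   h, m = 0, 1
--   for j in L:
--     assert((0 < j) and (j <= n))
--     h += m*j
--     m *= (n+1)
--   return h
-- ===== SOURCE B (Python) =====
-- def myhash(L, n):          # n is max row length
--     assert len(L) <= n
--     h = 0
--     for j in reversed(L):
--         assert 0 < j <= n
--         h = h * (n + 1) + j
--     return h
-- ===== Notes on version B (the rewrite author's own statement) =====
-- stated objective: simpler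
-- what changed: B replaces the two-accumulator loop (running sum h and running multiplier m) by Horner's method over the reversed list with a single accumulator h = h*(n+1)+j.
import Mathlib
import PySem

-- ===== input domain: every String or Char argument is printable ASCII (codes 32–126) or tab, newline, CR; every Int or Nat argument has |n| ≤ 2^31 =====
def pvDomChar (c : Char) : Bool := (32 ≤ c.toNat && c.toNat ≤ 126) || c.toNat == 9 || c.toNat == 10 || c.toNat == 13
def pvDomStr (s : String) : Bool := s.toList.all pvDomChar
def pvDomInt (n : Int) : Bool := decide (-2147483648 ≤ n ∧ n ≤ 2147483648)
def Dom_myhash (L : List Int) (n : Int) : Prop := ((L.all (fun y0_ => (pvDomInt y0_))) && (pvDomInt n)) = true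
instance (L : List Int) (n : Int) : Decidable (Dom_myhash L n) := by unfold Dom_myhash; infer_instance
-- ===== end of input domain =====

-- B computes the same base-(n+1) encoding by Horner's method over the reversed list
-- with a single accumulator, dropping A's running multiplier m (objective: simpler).

-- ===== PORT A =====
def myhash (L : List Int) (n : Int) : Int :=
  (L.foldl (fun (p : Int × Int) j => (p.1 + p.2 * j, p.2 * (n + 1))) (0, 1)).1

-- ===== PORT B =====
def myhash_alt (L : List Int) (n : Int) : Int :=
  L.reverse.foldl (fun h j => h * (n + 1) + j) 0

-- ===== PRECONDITION & SPEC =====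
-- Pre_ excludes exactly the inputs where A's asserts raise AssertionError:
-- len(L) > n, or some element j with j ≤ 0 or j > n.
def Pre_myhash (L : List Int) (n : Int) : Prop :=
  (L.length : Int) ≤ n ∧ ∀ j ∈ L, 0 < j ∧ j ≤ n
instance (L : List Int) (n : Int) : Decidable (Pre_myhash L n) := by unfold Pre_myhash; infer_instance

def pvWitness_myhash : List Int × Int := ([2, 1, 3], 3)

def Spec_myhash (L : List Int) (n : Int) (out : Int) : Prop := out = myhash_alt L n
instance (L : List Int) (n : Int) (out : Int) : Decidable (Spec_myhash L n out) := by unfold Spec_myhash; infer_instance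

-- ===== CLAIM (what is proved, stated in full; the proofs are below) =====
def Claim_equal_myhash : Prop := ∀ (L : List Int) (n : Int), Dom_myhash L n → Pre_myhash L n → Spec_myhash L n (myhash L n)

-- ===== LEMMAS AND PROOFS =====

-- the common value: Σ_i L[i] * (n+1)^i, as a foldr
def pvVal (n : Int) : List Int → Int
  | [] => 0
  | j :: t => j + (n + 1) * pvVal n t

theorem pvA_loop (n : Int) (L : List Int) : ∀ (h m : Int),
    (L.foldl (fun (p : Int × Int) j => (p.1 + p.2 * j, p.2 * (n + 1))) (h, m)).1
      = h + m * pvVal n L := by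
  induction L with
  | nil => intro h m; simp [pvVal]
  | cons j t ih => intro h m; simp only [List.foldl_cons, pvVal, ih]; ring

theorem pvB_foldr (n : Int) (L : List Int) :
    L.foldr (fun j h => h * (n + 1) + j) 0 = pvVal n L := by
  induction L with
  | nil => rfl
  | cons j t ih => simp only [List.foldr_cons, pvVal, ih]; ring

-- ===== VERDICT (by name: the statement is the Claim_ definition above) =====
theorem myhash_spec : Claim_equal_myhash := by
  intro L n _ _
  show myhash L n = myhash_alt L n
  unfold myhash myhash_alt
  rw [List.foldl_reverse, pvA_loop, pvB_foldr]
  ring
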